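-- pv_equiv track=rewrite | github.com/dieterich-lab/circtools | circtools/sirna/sirna.py | calculateGCStretch
-- ===== SOURCE A (Python) =====
-- def calculateGCStretch(rna_string):
--     myString = rna_string
--     stretch = 0
--
--     i = 0
--     while i < len(myString):
--         newStretch = 0
--         if myString[i:i+1] == "G" or myString[i:i+1] == "C":
--             newStretch += 1
--             while myString[i+1:i+2] == "G" or myString[i+1:i+2] == "C":
--                 newStretch += 1
--                 i += 1
--         if newStretch > stretch:
--             stretch = newStretch
--         i += 1
--     return stretch
-- ===== SOURCE B (Python) =====
-- def calculateGCStretch(rna_string):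
--     current = 0
--     best = 0
--     for c in rna_string:
--         if c == 'G' or c == 'C':
--             current += 1
--         else:
--             current = 0
--         if current > best:
--             best = current
--     return best
-- ===== Notes on version B (the rewrite author's own statement) =====
-- stated objective: simpler
-- what changed: Replaced A's index-driven outer while with an inner slice-probing while (run detection then run consumption) by a single flat per-character pass keeping two running integers (current run length and best), with no slicing or index arithmetic.
import Mathlib
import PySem

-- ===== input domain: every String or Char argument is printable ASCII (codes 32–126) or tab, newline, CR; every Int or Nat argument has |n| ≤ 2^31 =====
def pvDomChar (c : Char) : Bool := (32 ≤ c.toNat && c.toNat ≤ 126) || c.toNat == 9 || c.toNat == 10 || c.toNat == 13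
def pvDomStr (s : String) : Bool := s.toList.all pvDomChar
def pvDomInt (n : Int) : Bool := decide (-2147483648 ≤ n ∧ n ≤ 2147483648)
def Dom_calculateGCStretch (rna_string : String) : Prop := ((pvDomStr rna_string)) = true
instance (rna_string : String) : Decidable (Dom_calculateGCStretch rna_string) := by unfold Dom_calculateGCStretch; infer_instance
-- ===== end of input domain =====

-- B replaces A's nested run-detect/run-consume while loops by one flat pass with two counters; objective: simpler (and measured faster by a constant factor: no per-character slice objects).

-- ===== PORT A =====
-- s[i:i+1] == "G" or s[i:i+1] == "C" on the suffix starting at i is a head test of that suffix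
def pvIsGC (c : Char) : Bool := c == 'G' || c == 'C'

-- inner while: while myString[i+1:i+2] is G/C: newStretch += 1; i += 1
-- state: the suffix of the string starting at index i, and newStretch
def pvInnerA : List Char → Int → List Char × Int
  | c0 :: c1 :: rest, ns =>
      if pvIsGC c1 then pvInnerA (c1 :: rest) (ns + 1) else (c0 :: c1 :: rest, ns)
  | l, ns => (l, ns)

lemma pvInnerA_fst_len : ∀ (l : List Char) (ns : Int), ((pvInnerA l ns).1).length ≤ l.length := by
  intro l
  induction l with
  | nil => intro ns; simp [pvInnerA]
  | cons c tl ih =>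
    intro ns
    cases tl with
    | nil => simp [pvInnerA]
    | cons c1 rest =>
      by_cases h : pvIsGC c1 = true
      · simp only [pvInnerA, h, if_true]
        exact le_trans (ih (ns + 1)) (by simp)
      · simp [pvInnerA, h]

-- outer while over the suffix starting at index i; stretch is the accumulator
def pvOuterA : List Char → Int → Int
  | [], stretch => stretch
  | c :: rest, stretch =>
      let p := if pvIsGC c then pvInnerA (c :: rest) 1 else (c :: rest, 0)
      let stretch' := if p.2 > stretch then p.2 else stretch
      pvOuterA p.1.tail stretch'
termination_by l _ => l.length
decreasing_by
  have h1 : p.1.length ≤ (c :: rest).length := by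
    by_cases h : pvIsGC c = true
    · simpa [p, h] using pvInnerA_fst_len (c :: rest) 1
    · simp [p, h]
  cases hp : p.1 with
  | nil => simp
  | cons x xs =>
    rw [hp] at h1
    simp only [List.tail_cons]
    simp only [List.length_cons] at h1 ⊢
    omega

def calculateGCStretch (rna_string : String) : Int :=
  pvOuterA rna_string.toList 0

-- ===== PORT B =====
def pvLoopB : List Char → Int → Int → Int
  | [], _, best => best
  | c :: cs, current, best =>
      let current' := if c == 'G' || c == 'C' then current + 1 else 0
      let best' := if current' > best then current' else best
      pvLoopB cs current' best'

def calculateGCStretch_alt (rna_string : String) : Int :=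
  pvLoopB rna_string.toList 0 0

-- ===== PRECONDITION & SPEC =====
def Spec_calculateGCStretch (rna_string : String) (out : Int) : Prop := out = calculateGCStretch_alt rna_string
instance (rna_string : String) (out : Int) : Decidable (Spec_calculateGCStretch rna_string out) := by unfold Spec_calculateGCStretch; infer_instance

-- ===== CLAIM (what is proved, stated in full; the proofs are below) =====
def Claim_equal_calculateGCStretch : Prop := ∀ (rna_string : String), Dom_calculateGCStretch rna_string → Spec_calculateGCStretch rna_string (calculateGCStretch rna_string)

-- ===== LEMMAS AND PROOFS =====

-- length of the G/C prefix of l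
def pvRun : List Char → Int
  | [] => 0
  | c :: cs => if pvIsGC c then 1 + pvRun cs else 0

-- l with its G/C prefix removed
def pvDropRun : List Char → List Char
  | [] => []
  | c :: cs => if pvIsGC c then pvDropRun cs else c :: cs

-- longest G/C run anywhere in l
def pvM : List Char → Int
  | [] => 0
  | c :: cs => max (pvRun (c :: cs)) (pvM cs)

lemma pvRun_nonneg : ∀ l, 0 ≤ pvRun l := by
  intro l; cases l with
  | nil => simp [pvRun]
  | cons c cs =>
    simp only [pvRun]
    split
    · have := pvRun_nonneg cs; omega
    · omega

lemma pvM_nonneg : ∀ l, 0 ≤ pvM l := by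
  intro l; cases l with
  | nil => simp [pvM]
  | cons c cs =>
    simp only [pvM]
    have := pvM_nonneg cs
    omega

lemma pvDropRun_len : ∀ l, (pvDropRun l).length ≤ l.length := by
  intro l
  induction l with
  | nil => simp [pvDropRun]
  | cons c cs ih =>
    simp only [pvDropRun]
    split
    · exact le_trans ih (by simp)
    · simp

-- key decomposition: the max run of l is the max of its leading run and the max run after it
lemma pvM_decomp : ∀ l, pvM l = max (pvRun l) (pvM (pvDropRun l)) := by
  intro l
  induction l with
  | nil => simp [pvM, pvRun, pvDropRun]
  | cons c cs ih =>
    by_cases h : pvIsGC c = true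
    · have hr : pvRun (c :: cs) = 1 + pvRun cs := by simp [pvRun, h]
      have hd : pvDropRun (c :: cs) = pvDropRun cs := by simp [pvDropRun, h]
      have hrn := pvRun_nonneg cs
      simp only [pvM, hr, hd, ih]
      omega
    · have hr : pvRun (c :: cs) = 0 := by simp [pvRun, h]
      have hd : pvDropRun (c :: cs) = c :: cs := by simp [pvDropRun, h]
      have hm := pvM_nonneg cs
      simp only [pvM, hr, hd]
      omega

-- the inner while adds the G/C-prefix length of the tail and leaves a suffix whose tail is pvDropRun of the tail
lemma pvInnerA_spec : ∀ (l : List Char) (ns : Int),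
    (pvInnerA l ns).2 = ns + pvRun l.tail ∧ ((pvInnerA l ns).1).tail = pvDropRun l.tail := by
  intro l
  induction l with
  | nil => intro ns; simp [pvInnerA, pvRun, pvDropRun]
  | cons c tl ih =>
    intro ns
    cases tl with
    | nil => simp [pvInnerA, pvRun, pvDropRun]
    | cons c1 rest =>
      by_cases h : pvIsGC c1 = true
      · have := ih (ns + 1)
        simp only [pvInnerA, h, if_true, List.tail_cons] at this ⊢
        rw [this.1, this.2]
        constructor
        · simp [pvRun, h]; ring
        · simp [pvDropRun, h]
      · simp [pvInnerA, h, pvRun, pvDropRun]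

lemma pvOuterA_eq : ∀ (n : Nat) (l : List Char), l.length ≤ n → ∀ (s : Int), 0 ≤ s →
    pvOuterA l s = max s (pvM l) := by
  intro n
  induction n with
  | zero =>
    intro l hl s hs
    have : l = [] := by cases l <;> simp_all
    subst this
    simp [pvOuterA, pvM]
    omega
  | succ n ih =>
    intro l hl s hs
    cases l with
    | nil => simp [pvOuterA, pvM]; omega
    | cons c rest =>
      by_cases h : pvIsGC c = true
      · have hin := pvInnerA_spec (c :: rest) 1
        simp only [List.tail_cons] at hin
        have hns : (pvInnerA (c :: rest) 1).2 = pvRun (c :: rest) := by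
          rw [hin.1]; simp [pvRun, h]
        have hrn := pvRun_nonneg (c :: rest)
        have hlen : (pvDropRun rest).length ≤ n := by
          have := pvDropRun_len rest
          simp only [List.length_cons] at hl
          omega
        rw [pvOuterA]
        simp only [h, if_true, hin.2, hns]
        rw [ih (pvDropRun rest) hlen _ (by omega)]
        have hdec := pvM_decomp rest
        have hM : pvM (c :: rest) = max (pvRun (c :: rest)) (pvM (pvDropRun rest)) := by
          have hr : pvRun (c :: rest) = 1 + pvRun rest := by simp [pvRun, h]
          have hrn2 := pvRun_nonneg rest
          simp only [pvM, hr, hdec]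
          omega
        rw [hM]
        omega
      · rw [pvOuterA]
        simp only [h, Bool.false_eq_true, if_false, List.tail_cons]
        have hlen : rest.length ≤ n := by
          simp only [List.length_cons] at hl; omega
        rw [if_neg (by omega : ¬ ((0 : Int) > s))]
        rw [ih rest hlen s hs]
        have hr : pvRun (c :: rest) = 0 := by simp [pvRun, h]
        have hm := pvM_nonneg rest
        simp only [pvM, hr]
        omega

lemma pvLoopB_eq : ∀ (l : List Char) (cur best : Int), 0 ≤ cur → cur ≤ best →
    pvLoopB l cur best = max best (max (cur + pvRun l) (pvM (pvDropRun l))) := by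
  intro l
  induction l with
  | nil =>
    intro cur best hc hcb
    simp [pvLoopB, pvRun, pvDropRun, pvM]
    omega
  | cons c cs ih =>
    intro cur best hc hcb
    have hgc : (c == 'G' || c == 'C') = pvIsGC c := rfl
    by_cases h : pvIsGC c = true
    · rw [pvLoopB]
      simp only [hgc, h, if_true]
      have hrn := pvRun_nonneg cs
      have hmn := pvM_nonneg (pvDropRun cs)
      rw [ih (cur + 1) (if cur + 1 > best then cur + 1 else best) (by omega) (by split <;> omega)]
      have hr : pvRun (c :: cs) = 1 + pvRun cs := by simp [pvRun, h]
      have hd : pvDropRun (c :: cs) = pvDropRun cs := by simp [pvDropRun, h]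
      rw [hr, hd]
      split <;> omega
    · rw [pvLoopB]
      simp only [hgc, h, Bool.false_eq_true, if_false]
      rw [if_neg (by omega : ¬ ((0 : Int) > best))]
      rw [ih 0 best le_rfl (by omega)]
      have hr : pvRun (c :: cs) = 0 := by simp [pvRun, h]
      have hd : pvDropRun (c :: cs) = c :: cs := by simp [pvDropRun, h]
      have hdec := pvM_decomp cs
      have hM : pvM (c :: cs) = pvM cs := by
        have := pvM_nonneg cs
        simp only [pvM, hr]
        omega
      rw [hr, hd, hM, hdec]
      omega

-- ===== VERDICT (by name: the statement is the Claim_ definition above) =====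
theorem calculateGCStretch_spec : Claim_equal_calculateGCStretch := by
  intro s _
  unfold Spec_calculateGCStretch calculateGCStretch calculateGCStretch_alt
  rw [pvOuterA_eq s.toList.length s.toList le_rfl 0 le_rfl,
      pvLoopB_eq s.toList 0 0 le_rfl le_rfl]
  have h1 := pvM_nonneg s.toList
  have h2 := pvM_decomp s.toList
  omega
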